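-- pv_equiv track=rewrite | github.com/lizagrin/IntroExtractor-VK | train video/eval.py | find_last_block
-- ===== SOURCE A (Python) =====
-- def find_last_block(mask):
--     run1 = run0 = 0;
--     pos = len(mask) - 1
--     for i in range(len(mask) - 1, -1, -1):
--         m = mask[i]
--         if m:
--             run1 += 1; run0 = 0
--         else:
--             run0 += 1
--             if run1 >= 5 and run0 >= 10:
--                 pos = i + run0 - 1
--                 break
--     return pos
-- ===== SOURCE B (Python) =====
-- def find_last_block(mask):
--     # Build maximal runs of truthiness, newest run first.
--     runs = []  # list of [truthy, length], most recent (rightmost) run at index 0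
--     for m in mask:
--         b = bool(m)
--         if runs and runs[0][0] == b:
--             runs[0][1] += 1
--         else:
--             runs.insert(0, [b, 1])
--     # Scan runs right-to-left, tracking ones seen so far and the rightmost
--     # index of the current run.
--     ones = 0
--     idx = len(mask) - 1
--     for b, length in runs:
--         if b:
--             ones += length
--         elif length >= 10 and ones >= 5:
--             return idx
--         idx -= length
--     return len(mask) - 1
-- ===== Notes on version B (the rewrite author's own statement) =====
-- stated objective: alternative
-- what changed: Replaces the element-by-element backward scan with break-out counters by a run-length encoding pass followed by a right-to-left scan over whole runs, returning the rightmost index of the first zero-run of length >= 10 with >= 5 truthy elements to its right.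
import Mathlib
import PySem

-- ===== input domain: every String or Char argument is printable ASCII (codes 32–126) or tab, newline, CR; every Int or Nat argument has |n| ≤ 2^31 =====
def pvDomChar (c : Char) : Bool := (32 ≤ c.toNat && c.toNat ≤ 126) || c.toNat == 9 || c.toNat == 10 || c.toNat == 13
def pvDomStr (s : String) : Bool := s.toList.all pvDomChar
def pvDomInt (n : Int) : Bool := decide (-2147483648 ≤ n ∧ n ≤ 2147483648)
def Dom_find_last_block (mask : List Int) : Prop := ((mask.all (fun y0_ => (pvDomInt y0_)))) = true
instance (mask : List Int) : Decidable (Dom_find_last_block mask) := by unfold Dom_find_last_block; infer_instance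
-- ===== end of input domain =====

-- B replaces A's backward element scan with break-out counters by a run-length
-- encoding followed by a scan over whole runs (alternative decomposition, same cost).

-- ===== PORT A =====
-- the for-loop over range(len-1, -1, -1) with early 'break'; state (run1, run0, pos)
def find_last_block_go (mask : List Int) : List Int → Int → Int → Int → Int
  | [], _, _, pos => pos
  | i :: rest, run1, run0, pos =>
    match PySem.List.pyGet? mask i with
    | none => pos    -- unreachable: every index produced by range(len-1,-1,-1) is in range
    | some m =>
      if m ≠ 0 then find_last_block_go mask rest (run1 + 1) 0 pos
      else
        if 5 ≤ run1 ∧ 10 ≤ run0 + 1 then i + (run0 + 1) - 1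
        else find_last_block_go mask rest run1 (run0 + 1) pos

def find_last_block (mask : List Int) : Int :=
  find_last_block_go mask (PySem.List.pyRange ((mask.length : Int) - 1) (-1) (-1)) 0 0
    ((mask.length : Int) - 1)

-- ===== PORT B =====
-- first loop of Source B: build runs, most recent (rightmost) run at the head
def fbAlt_build : List Int → List (Bool × Int) → List (Bool × Int)
  | [], runs => runs
  | m :: rest, runs =>
    match runs with
    | (b', l) :: t =>
      if b' == (m != 0) then fbAlt_build rest ((b', l + 1) :: t)
      else fbAlt_build rest (((m != 0), 1) :: (b', l) :: t)
    | [] => fbAlt_build rest [((m != 0), 1)]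

-- second loop of Source B: scan runs right-to-left with (ones, idx)
def fbAlt_scan : List (Bool × Int) → Int → Int → Int → Int
  | [], _, _, dflt => dflt
  | (b, l) :: rest, ones, idx, dflt =>
    if b then fbAlt_scan rest (ones + l) (idx - l) dflt
    else if 10 ≤ l ∧ 5 ≤ ones then idx
    else fbAlt_scan rest ones (idx - l) dflt

def find_last_block_alt (mask : List Int) : Int :=
  fbAlt_scan (fbAlt_build mask []) 0 ((mask.length : Int) - 1) ((mask.length : Int) - 1)

-- ===== PRECONDITION & SPEC =====
def Spec_find_last_block (mask : List Int) (out : Int) : Prop := out = find_last_block_alt mask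
instance (mask : List Int) (out : Int) : Decidable (Spec_find_last_block mask out) := by unfold Spec_find_last_block; infer_instance

-- ===== CLAIM (what is proved, stated in full; the proofs are below) =====
def Claim_equal_find_last_block : Prop := ∀ (mask : List Int), Dom_find_last_block mask → Spec_find_last_block mask (find_last_block mask)

-- ===== LEMMAS AND PROOFS =====

-- A's loop re-expressed over the reversed element list, carrying the current index.
def loopR : List Int → Int → Int → Int → Int → Int
  | [], _, _, _, dflt => dflt
  | m :: rest, i, run1, run0, dflt =>
    if m ≠ 0 then loopR rest (i - 1) (run1 + 1) 0 dflt
    else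
      if 5 ≤ run1 ∧ 10 ≤ run0 + 1 then i + run0
      else loopR rest (i - 1) run1 (run0 + 1) dflt

-- one grouping step (prepending an element to an already-grouped list)
def rstep (x : Int) : List (Bool × Int) → List (Bool × Int)
  | (b, l) :: t => if b == (x != 0) then (b, l + 1) :: t else ((x != 0), 1) :: (b, l) :: t
  | [] => [((x != 0), 1)]

-- runs of a list, grouped by truthiness, leftmost run first
def runsOf : List Int → List (Bool × Int)
  | [] => []
  | x :: xs => rstep x (runsOf xs)

-- prepend p pending zeros to a run list (merging into a leading zero-run)
def pz (p : Int) : List (Bool × Int) → List (Bool × Int)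
  | runs =>
    if p = 0 then runs
    else
      match runs with
      | (false, l) :: t => (false, p + l) :: t
      | r => (false, p) :: r

theorem fbAlt_build_append (xs ys : List Int) (acc : List (Bool × Int)) :
    fbAlt_build (xs ++ ys) acc = fbAlt_build ys (fbAlt_build xs acc) := by
  induction xs generalizing acc with
  | nil => rfl
  | cons x xs ih =>
    cases acc with
    | nil => simpa [fbAlt_build] using ih _
    | cons hd t =>
      obtain ⟨b, l⟩ := hd
      by_cases h : b == (x != 0) <;> simp [fbAlt_build, h, ih]

theorem fbAlt_build_singleton (x : Int) (acc : List (Bool × Int)) :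
    fbAlt_build [x] acc = rstep x acc := by
  cases acc with
  | nil => rfl
  | cons hd t =>
    obtain ⟨b, l⟩ := hd
    by_cases h : b == (x != 0) <;> simp [fbAlt_build, rstep, h]

theorem fbAlt_build_eq_runsOf (mask : List Int) :
    fbAlt_build mask [] = runsOf mask.reverse := by
  induction mask using List.reverseRecOn with
  | nil => rfl
  | append_singleton xs x ih =>
    rw [fbAlt_build_append, fbAlt_build_singleton, ih]
    simp [runsOf]

theorem runsOf_len_pos (xs : List Int) : ∀ p ∈ runsOf xs, 1 ≤ p.2 := by
  induction xs with
  | nil => simp [runsOf]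
  | cons x xs ih =>
    intro p hp
    simp only [runsOf] at hp
    rcases h : runsOf xs with _ | ⟨⟨b, l⟩, t⟩
    · rw [h] at hp; simp [rstep] at hp; simp [hp]
    · rw [h] at hp
      have hl : 1 ≤ l := by simpa using ih ⟨b, l⟩ (by rw [h]; simp)
      by_cases hb : b == (x != 0)
      · rw [rstep, if_pos hb] at hp
        rcases List.mem_cons.mp hp with hp | hp
        · subst hp; simp; omega
        · exact ih p (by rw [h]; exact List.mem_cons_of_mem _ hp)
      · rw [rstep, if_neg hb] at hp
        rcases List.mem_cons.mp hp with hp | hp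
        · subst hp; simp
        · rcases List.mem_cons.mp hp with hp | hp
          · subst hp; simpa using hl
          · exact ih p (by rw [h]; exact List.mem_cons_of_mem _ hp)

theorem pz_rstep_zero (p : Int) (hp : 0 ≤ p) (R : List (Bool × Int)) :
    pz p (rstep 0 R) = pz (p + 1) R := by
  have hp1 : ¬ (p + 1 = 0) := by omega
  rcases R with _ | ⟨⟨b, l⟩, t⟩
  · by_cases h : p = 0 <;> simp [rstep, pz, h, hp1]
  · cases b
    · by_cases h : p = 0 <;> simp [rstep, pz, h, hp1] <;> ring
    · by_cases h : p = 0 <;> simp [rstep, pz, h, hp1]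

theorem loopR_eq_scan (r : List Int) :
    ∀ (i run1 run0 dflt : Int), 0 ≤ run0 → (5 ≤ run1 → run0 ≤ 9) →
      loopR r i run1 run0 dflt = fbAlt_scan (pz run0 (runsOf r)) run1 (i + run0) dflt := by
  induction r with
  | nil =>
    intro i run1 run0 dflt h0 h9
    by_cases h : run0 = 0
    · simp [loopR, runsOf, pz, h, fbAlt_scan]
    · have : ¬ (10 ≤ run0 ∧ 5 ≤ run1) := by
        rintro ⟨ha, hb⟩; exact absurd (h9 hb) (by omega)
      simp [loopR, runsOf, pz, h, fbAlt_scan, this]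
  | cons x xs ih =>
    intro i run1 run0 dflt h0 h9
    by_cases hx : x = 0
    · subst hx
      by_cases hbr : 5 ≤ run1 ∧ 10 ≤ run0 + 1
      · -- break: run0 = 9 by the invariant
        have h09 : run0 = 9 := by have := h9 hbr.1; omega
        subst h09
        have hne : (9 : Int) ≠ 0 := by norm_num
        simp only [loopR, ne_eq, not_true_eq_false, if_false, if_pos hbr, runsOf]
        rcases hR : runsOf xs with _ | ⟨⟨b, l⟩, t⟩
        · simp [rstep, pz, fbAlt_scan, hbr.1]
        · cases b
          · have hl : 1 ≤ l := by
              have := runsOf_len_pos xs ⟨false, l⟩ (by rw [hR]; simp)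
              simpa using this
            have : (10 : Int) ≤ 9 + (l + 1) := by omega
            simp [rstep, pz, fbAlt_scan, hbr.1, this]
          · simp [rstep, pz, fbAlt_scan, hbr.1]
      · -- no break: consume the zero
        have harg : i - 1 + (run0 + 1) = i + run0 := by ring
        have h9' : 5 ≤ run1 → run0 + 1 ≤ 9 := by
          intro h5; rcases not_and_or.mp hbr with h | h
          · exact absurd h5 h
          · omega
        simp only [loopR, ne_eq, not_true_eq_false, if_false, if_neg hbr]
        rw [ih (i - 1) run1 (run0 + 1) dflt (by omega) h9', harg, runsOf,
          pz_rstep_zero run0 h0]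
    · -- truthy element
      have hb : (x != 0) = true := by simpa using hx
      simp only [loopR, ne_eq, hx, not_false_eq_true, if_pos]
      rw [ih (i - 1) (run1 + 1) 0 dflt (by omega) (by omega)]
      have hpz0 : pz 0 (runsOf xs) = runsOf xs := by simp [pz]
      rw [hpz0]
      -- now reduce the RHS
      have hnb : ¬ (10 ≤ run0 ∧ 5 ≤ run1) := by
        rintro ⟨ha, hb'⟩; exact absurd (h9 hb') (by omega)
      simp only [runsOf]
      rcases hR : runsOf xs with _ | ⟨⟨b, l⟩, t⟩
      · by_cases h : run0 = 0 <;>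
          simp [rstep, hb, pz, h, fbAlt_scan, hnb] 
      · cases b
        · -- head of runsOf xs is a zero-run: new run (true,1) in front
          by_cases h : run0 = 0 <;>
            simp [rstep, hb, pz, h, fbAlt_scan, hnb]
        · -- head is a one-run: merge
          by_cases h : run0 = 0 <;>
            · simp only [rstep, hb, beq_self_eq_true, if_true, pz, h, if_false, fbAlt_scan]
              simp [hnb]
              congr 1 <;> ring

-- relate A's range-indexed loop to loopR over the reversed prefix
theorem go_eq_loopR (mask : List Int) :
    ∀ (k : Nat), k ≤ mask.length → ∀ (run1 run0 pos : Int),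
      find_last_block_go mask (PySem.List.pyRange ((k : Int) - 1) (-1) (-1)) run1 run0 pos
        = loopR (mask.take k).reverse ((k : Int) - 1) run1 run0 pos := by
  intro k
  induction k with
  | zero =>
    intro _ run1 run0 pos
    rw [PySem.List.pyRange_neg_one_eq_nil (by norm_num)]
    simp [find_last_block_go, loopR]
  | succ k ih =>
    intro hk run1 run0 pos
    have hk' : k < mask.length := by omega
    have hcast : ((k + 1 : Nat) : Int) - 1 = (k : Int) := by push_cast; ring
    rw [hcast, PySem.List.pyRange_neg_one_cons (by omega)]
    have htake : (mask.take (k + 1)).reverse = mask[k] :: (mask.take k).reverse := by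
      rw [List.take_add_one, List.getElem?_eq_getElem hk']
      simp
    rw [htake]
    simp only [find_last_block_go, PySem.List.pyGet?_natCast, List.getElem?_eq_getElem hk']
    simp only [loopR]
    by_cases hm : mask[k] = 0
    · simp only [hm, ne_eq, not_true_eq_false, if_false]
      by_cases hbr : 5 ≤ run1 ∧ 10 ≤ run0 + 1
      · simp only [if_pos hbr]; ring
      · simp only [if_neg hbr]
        have := ih (by omega) run1 (run0 + 1) pos
        rwa [show (k : Int) - 1 = ((k : Nat) : Int) - 1 by norm_num] at this
    · simp only [ne_eq, hm, not_false_eq_true, if_pos]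
      exact ih (by omega) (run1 + 1) 0 pos

theorem find_last_block_eq_loopR (mask : List Int) :
    find_last_block mask
      = loopR mask.reverse ((mask.length : Int) - 1) 0 0 ((mask.length : Int) - 1) := by
  have := go_eq_loopR mask mask.length le_rfl 0 0 ((mask.length : Int) - 1)
  rw [List.take_length] at this
  exact this

-- ===== VERDICT (by name: the statement is the Claim_ definition above) =====
theorem find_last_block_spec : Claim_equal_find_last_block := by
  intro mask _
  unfold Spec_find_last_block find_last_block_alt
  rw [find_last_block_eq_loopR, fbAlt_build_eq_runsOf,
    loopR_eq_scan mask.reverse ((mask.length : Int) - 1) 0 0 _ le_rfl (by omega)]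
  simp [pz]
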